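-- pv_equiv track=rewrite | github.com/HarshKohli/leetcode_practice | palindrome_pairs.py | get_remaining_rev
-- ===== SOURCE A (Python) =====
-- def get_remaining_rev(left, right, word, size):
--     can_palin = True
--     p1, p2 = left, right
--     while p1 >= 0 and p2 < size:
--         if word[p1] == word[p2]:
--             p2 = p2 + 1
--             p1 = p1 - 1
--         else:
--             can_palin = False
--             break
--     if can_palin:
--         return word[p2:][::-1]
--     return None
-- ===== SOURCE B (Python) =====
-- def get_remaining_rev(left, right, word, size):
--     n = min(left + 1, size - right)
--     if n < 0:
--         n = 0
--     if word[left - n + 1:left + 1][::-1] != word[right:right + n]: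
--         return None
--     return word[right + n:][::-1]
-- ===== Notes on version B (the rewrite author's own statement) =====
-- stated objective: idiomatic
-- what changed: Replaces the expanding two-pointer character-by-character while loop with a closed-form extent n = max(0, min(left+1, size-right)) plus a single reversed-slice equality test, then returns the reversed suffix directly.
-- outside the precondition, e.g. on get_remaining_rev(0, -1, 'a', 1): A returns 'a', B returns None; on get_remaining_rev(0, 0, 'ab', 5): A returns 'b', B returns 'b'
import Mathlib
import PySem

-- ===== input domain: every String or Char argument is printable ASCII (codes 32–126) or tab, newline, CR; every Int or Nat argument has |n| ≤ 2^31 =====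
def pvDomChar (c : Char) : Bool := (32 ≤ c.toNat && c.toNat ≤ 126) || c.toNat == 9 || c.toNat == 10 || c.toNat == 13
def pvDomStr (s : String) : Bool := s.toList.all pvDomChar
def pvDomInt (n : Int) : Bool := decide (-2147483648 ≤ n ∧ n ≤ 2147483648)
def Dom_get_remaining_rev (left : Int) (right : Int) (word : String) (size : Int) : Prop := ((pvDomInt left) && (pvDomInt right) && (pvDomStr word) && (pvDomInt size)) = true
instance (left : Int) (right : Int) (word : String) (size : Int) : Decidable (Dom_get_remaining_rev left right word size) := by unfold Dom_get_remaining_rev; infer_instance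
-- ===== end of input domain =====

-- B replaces A's expanding two-pointer while loop by a closed-form extent plus one
-- reversed-slice comparison (objective: idiomatic; same cost).


-- ===== PORT A =====
-- the while loop: state (can_palin, p2); stops exactly where A's loop stops.
-- On an out-of-range index (where Python raises IndexError; excluded by Pre_) it
-- returns (false, p2) as a dummy value.
def pvLoopA (w : List Char) (size : Int) (p1 : Int) (p2 : Int) : Bool × Int :=
  if _h : 0 ≤ p1 ∧ p2 < size then
    match PySem.List.pyGet? w p1, PySem.List.pyGet? w p2 with
    | some c1, some c2 =>
        if c1 = c2 then pvLoopA w size (p1 - 1) (p2 + 1)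
        else (false, p2)
    | _, _ => (false, p2)   -- IndexError in Python: outside Pre_
  else (true, p2)
termination_by (p1 + 1).toNat
decreasing_by omega

def get_remaining_rev (left : Int) (right : Int) (word : String) (size : Int) : Option String :=
  let r := pvLoopA word.toList size left right
  if r.1 then
    -- word[p2:][::-1] ([::-1] is reverse, PySem.Str.slice?_none_none_neg_one)
    some (String.ofList (PySem.List.slice word.toList (some r.2) none).reverse)
  else none

-- ===== PORT B =====
def get_remaining_rev_alt (left : Int) (right : Int) (word : String) (size : Int) : Option String :=
  let n0 : Int := min (left + 1) (size - right)
  let n : Int := if n0 < 0 then 0 else n0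
  let w := word.toList
  if (PySem.List.slice w (some (left - n + 1)) (some (left + 1))).reverse
       ≠ PySem.List.slice w (some right) (some (right + n)) then none
  else some (String.ofList (PySem.List.slice w (some (right + n)) none).reverse)

-- ===== PRECONDITION & SPEC =====
-- Pre_ restricts to the natural domain of the scan: either the loop is never entered,
-- or every index the loop can touch is in range (0 ≤ left < len(word), 0 ≤ right < size ≤ len(word)).
-- It excludes inputs where A's scan runs past the string (size > len(word) or left ≥ len(word)),
-- on which A raises IndexError on some inputs, and inputs with negative right, an out-of-domain
-- corner where A's comparisons wrap around to the end of the string.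
def Pre_get_remaining_rev (left : Int) (right : Int) (word : String) (size : Int) : Prop :=
  (left < 0 ∨ size ≤ right) ∨
  (0 ≤ left ∧ left < (word.toList.length : Int) ∧ 0 ≤ right ∧ right < size ∧
   size ≤ (word.toList.length : Int))
instance (left : Int) (right : Int) (word : String) (size : Int) : Decidable (Pre_get_remaining_rev left right word size) := by unfold Pre_get_remaining_rev; infer_instance

def pvWitness_get_remaining_rev : Int × Int × String × Int := (1, 1, "aba", 3)

def Spec_get_remaining_rev (left : Int) (right : Int) (word : String) (size : Int) (out : Option String) : Prop := out = get_remaining_rev_alt left right word size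
instance (left : Int) (right : Int) (word : String) (size : Int) (out : Option String) : Decidable (Spec_get_remaining_rev left right word size out) := by unfold Spec_get_remaining_rev; infer_instance

-- ===== CLAIM (what is proved, stated in full; the proofs are below) =====
def Claim_equal_get_remaining_rev : Prop := ∀ (left : Int) (right : Int) (word : String) (size : Int), Dom_get_remaining_rev left right word size → Pre_get_remaining_rev left right word size → Spec_get_remaining_rev left right word size (get_remaining_rev left right word size)

-- ===== LEMMAS AND PROOFS =====

-- the matching condition both programs decide: the first n left/right index pairs carry equal chars
def pvKey (w : List Char) (left right : Int) (n : Nat) : Prop :=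
  ∀ i : Nat, i < n → PySem.List.pyGet? w (left - i) = PySem.List.pyGet? w (right + i)

lemma pvSlice_self {α : Type} (xs : List α) (a : Int) :
    PySem.List.slice xs (some a) (some a) = [] := by
  have := PySem.List.length_slice xs a a
  exact List.eq_nil_of_length_eq_zero (by omega)

lemma pvGet_in_range (w : List Char) (i : Int) (h0 : 0 ≤ i) (h : i < (w.length : Int)) :
    PySem.List.pyGet? w i = some (w[i.toNat]'(by omega)) := by
  have h1 : PySem.List.pyGet? w i = w[i.toNat]? := by
    conv_lhs => rw [show i = ((i.toNat : Nat) : Int) by omega]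
    rw [PySem.List.pyGet?_natCast]
  rw [h1, List.getElem?_eq_getElem (by omega)]

lemma pvKey_succ (w : List Char) (left right : Int) (n : Nat) :
    pvKey w left right (n + 1) ↔
      (PySem.List.pyGet? w left = PySem.List.pyGet? w right ∧ pvKey w (left - 1) (right + 1) n) := by
  constructor
  · intro h
    refine ⟨by simpa using h 0 (by omega), fun i hi => ?_⟩
    have := h (i + 1) (by omega)
    convert this using 2 <;> push_cast <;> ring
  · rintro ⟨h0, h⟩ i hi
    cases i with
    | zero => simpa using h0
    | succ j =>
      have := h j (by omega)
      convert this using 2 <;> push_cast <;> ring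

lemma pvLoopA_spec (w : List Char) (size : Int) (n : Nat) :
    ∀ left right : Int, left < (w.length : Int) → 0 ≤ right → size ≤ (w.length : Int) →
    (n : Int) = min (left + 1) (size - right) →
    (pvKey w left right n → pvLoopA w size left right = (true, right + n)) ∧
    (¬ pvKey w left right n → (pvLoopA w size left right).1 = false) := by
  induction n with
  | zero =>
    intro left right _ _ _ hn
    have hcond : ¬ (0 ≤ left ∧ right < size) := by omega
    rw [pvLoopA, dif_neg hcond]
    exact ⟨fun _ => by simp, fun hk => absurd (fun i hi => absurd hi (by omega)) hk⟩
  | succ n ih =>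
    intro left right hl hr0 hs hn
    have hl0 : 0 ≤ left := by omega
    have hrs : right < size := by omega
    have hcond : 0 ≤ left ∧ right < size := ⟨hl0, hrs⟩
    have hgl := pvGet_in_range w left hl0 hl
    have hgr := pvGet_in_range w right hr0 (by omega)
    have hstep : pvLoopA w size left right =
        if w[left.toNat]'(by omega) = w[right.toNat]'(by omega)
        then pvLoopA w size (left - 1) (right + 1) else (false, right) := by
      rw [pvLoopA, dif_pos hcond, hgl, hgr]
    rw [hstep]
    by_cases hc : w[left.toNat]'(by omega) = w[right.toNat]'(by omega)
    · rw [if_pos hc]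
      have ih' := ih (left - 1) (right + 1) (by omega) (by omega) hs (by omega)
      have hkiff := pvKey_succ w left right n
      constructor
      · intro hk
        rw [ih'.1 ((hkiff.1 hk).2), Prod.mk.injEq]
        exact ⟨rfl, by push_cast; ring⟩
      · intro hk
        refine ih'.2 (fun hk' => hk (hkiff.2 ⟨?_, hk'⟩))
        rw [hgl, hgr, hc]
    · rw [if_neg hc]
      constructor
      · intro hk
        have h0 := hk 0 (by omega)
        simp only [Nat.cast_zero, sub_zero, add_zero] at h0
        rw [hgl, hgr] at h0
        exact absurd (Option.some.inj h0) hc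
      · intro _; rfl

lemma pvSliceEq_iff_key (w : List Char) (size left right : Int) (n : Nat)
    (hl0 : 0 ≤ left) (hl : left < (w.length : Int)) (hr0 : 0 ≤ right)
    (hs : size ≤ (w.length : Int))
    (hn : (n : Int) = min (left + 1) (size - right)) (hrn : right + n ≤ size) :
    ((PySem.List.slice w (some (left - n + 1)) (some (left + 1))).reverse
       = PySem.List.slice w (some right) (some (right + n)))
      ↔ pvKey w left right n := by
  have hna : (n : Int) ≤ left + 1 := by omega
  have hnb : right + (n : Int) ≤ (w.length : Int) := by omega
  have e1 : PySem.List.slice w (some (left - n + 1)) (some (left + 1))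
      = List.take n (List.drop (left - n + 1).toNat w) := by
    rw [PySem.List.slice_of_nonneg w (by omega) (by omega) (by omega) (by omega)]
    congr 1; omega
  have e2 : PySem.List.slice w (some right) (some (right + n))
      = List.take n (List.drop right.toNat w) := by
    rw [PySem.List.slice_of_nonneg w (by omega) (by omega) (by omega) (by omega)]
    congr 1; omega
  have hlen1 : (List.take n (List.drop (left - n + 1).toNat w)).length = n := by
    simp [List.length_take, List.length_drop]; omega
  have hlen2 : (List.take n (List.drop right.toNat w)).length = n := by
    simp [List.length_take, List.length_drop]; omega
  have g1 : ∀ (i : Nat) (hi : i < n),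
      (List.take n (List.drop (left - n + 1).toNat w)).reverse[i]'(by rw [List.length_reverse, hlen1]; exact hi)
        = w[(left - i).toNat]'(by omega) := by
    intro i hi
    rw [List.getElem_reverse, List.getElem_take, List.getElem_drop]
    congr 1
    rw [hlen1]
    omega
  have g2 : ∀ (i : Nat) (hi : i < n),
      (List.take n (List.drop right.toNat w))[i]'(by rw [hlen2]; exact hi)
        = w[(right + i).toNat]'(by omega) := by
    intro i hi
    rw [List.getElem_take, List.getElem_drop]
    congr 1
    omega
  rw [e1, e2]
  constructor
  · intro h i hi
    rw [pvGet_in_range w (left - i) (by omega) (by omega),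
        pvGet_in_range w (right + i) (by omega) (by omega)]
    have := g1 i hi
    rw [← this]
    have := g2 i hi
    rw [← this]
    simp only [h]
  · intro hk
    apply List.ext_getElem (by rw [List.length_reverse, hlen1, hlen2])
    intro i h1 h2
    have hi : i < n := by rwa [hlen2] at h2
    rw [g1 i hi, g2 i hi]
    have := hk i hi
    rw [pvGet_in_range w (left - i) (by omega) (by omega),
        pvGet_in_range w (right + i) (by omega) (by omega)] at this
    exact Option.some.inj this

-- ===== VERDICT (by name: the statement is the Claim_ definition above) =====
theorem get_remaining_rev_spec : Claim_equal_get_remaining_rev := by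
  intro left right word size _hdom hpre
  unfold Spec_get_remaining_rev get_remaining_rev get_remaining_rev_alt
  rcases hpre with h1 | ⟨hl0, hl, hr0, hrs, hs⟩
  · -- loop never entered: both return word[right:][::-1]
    have hcond : ¬ (0 ≤ left ∧ right < size) := by omega
    rw [pvLoopA, dif_neg hcond]
    have hn0 : (if min (left + 1) (size - right) < 0 then (0:Int) else min (left + 1) (size - right)) = 0 := by
      rcases h1 with h | h <;> simp only [min_def] <;> split_ifs <;> omega
    simp only [hn0]
    simp [pvSlice_self]
  · -- loop entered with all indices in range
    set m : Int := min (left + 1) (size - right) with hm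
    have hmpos : 1 ≤ m := by omega
    have hn0 : (if m < 0 then (0:Int) else m) = ((m.toNat : Nat) : Int) := by
      rw [if_neg (by omega)]; omega
    have hmn : ((m.toNat : Nat) : Int) = min (left + 1) (size - right) := by omega
    have hA := pvLoopA_spec word.toList size m.toNat left right hl hr0 hs hmn
    have hB := pvSliceEq_iff_key word.toList size left right m.toNat hl0 hl hr0 hs hmn (by omega)
    simp only [hn0]
    by_cases hk : pvKey word.toList left right m.toNat
    · rw [hA.1 hk]
      simp only [if_neg (not_not_intro (hB.2 hk))]
      simp
    · have hfalse := hA.2 hk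
      have hne : (PySem.List.slice word.toList (some (left - ↑m.toNat + 1)) (some (left + 1))).reverse
          ≠ PySem.List.slice word.toList (some right) (some (right + ↑m.toNat)) := fun h => hk (hB.1 h)
      rw [if_pos hne]
      cases hres : pvLoopA word.toList size left right with
      | mk b p2 => rw [hres] at hfalse; simp at hfalse; simp [hfalse]
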